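-- pv_equiv track=rewrite | github.com/whidong/Coding_study | 알고리즘/stream_of_k-th_smallest_heapq.py | sumall_kth
-- ===== SOURCE A (Python) =====
-- import heapq
--
-- def sumall_kth(A) : #T(n) = 6nlogn + 7n + 4
-- 	mx ,mn= [], [] # 2hour
-- 	result, count = 0, 0 # 2hour
-- 	for i in A: # n hour
-- 		k = count//3+1 # 3hour
-- 		if not mx or -mx[0] >= i:
-- 			heapq.heappush(mx, -i) # log(n)hour
-- 		else:
-- 			heapq.heappush(mn, i) # log(n)hour
-- 		if len(mx) > k:
-- 			heapq.heappush(mn, -heapq.heappop(mx)) # 2log(n)hour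
-- 		elif len(mx) < k and mn:
-- 			heapq.heappush(mx, -heapq.heappop(mn)) # 2log(n)hour
-- 		if len(mx) >= k:
-- 			result += -mx[0] # 2hour
-- 		count += 1 # 2hour
-- 	return result
-- ===== SOURCE B (Python) =====
-- import bisect
--
-- def sumall_kth(A):
--     s = []
--     result, count = 0, 0
--     for i in A:
--         k = count // 3 + 1
--         bisect.insort(s, i)
--         result += s[k - 1]
--         count += 1
--     return result
-- ===== Notes on version B (the rewrite author's own statement) =====
-- stated objective: simpler
-- what changed: Replaced the two-heap (max-heap/min-heap) order-statistic maintenance with rebalancing by a single list kept sorted via bisect.insort, reading the k-th smallest by direct indexing s[k-1].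
import Mathlib
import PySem

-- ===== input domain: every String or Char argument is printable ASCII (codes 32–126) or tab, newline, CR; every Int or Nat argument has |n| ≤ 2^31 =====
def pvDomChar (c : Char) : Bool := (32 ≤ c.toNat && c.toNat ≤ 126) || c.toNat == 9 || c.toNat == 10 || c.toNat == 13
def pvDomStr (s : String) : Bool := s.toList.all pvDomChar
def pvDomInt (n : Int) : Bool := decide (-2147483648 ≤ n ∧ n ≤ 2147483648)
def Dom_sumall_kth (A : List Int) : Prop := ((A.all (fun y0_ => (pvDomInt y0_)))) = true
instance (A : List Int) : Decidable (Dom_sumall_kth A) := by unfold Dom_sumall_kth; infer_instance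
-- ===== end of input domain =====

-- B replaces the two-heap order-statistic maintenance by one sorted list with binary-search
-- insertion and direct indexing; objective: simpler (no speed claim).
-- ===== PORT A =====
-- CPython heapq transliterated by hand (PySem has no heap primitive):
-- pvSiftdown = heapq._siftdown, pvSiftup = heapq._siftup, step for step on a list with
-- List.set/getD (`newitem` is passed as a parameter; it always equals heap[pos]).
-- heap[...] reads are written `getD ... 0`: every read below is at an index the loop keeps
-- in range, where getD computes exactly Python's heap[i]; heappop's empty-list branch is
-- unreachable in A (its two call sites are guarded), so its result there is irrelevant.
def pvSiftdown (heap : List Int) (start pos : Nat) (new : Int) : List Int :=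
  if _h : start < pos then
    let pp := (pos - 1) / 2
    let parent := heap.getD pp 0
    if new < parent then pvSiftdown (heap.set pos parent) start pp new
    else heap.set pos new
  else heap.set pos new
termination_by pos
decreasing_by exact lt_of_le_of_lt (Nat.div_le_self _ _) (by omega)

def pvSiftup (heap : List Int) (start pos : Nat) (new : Int) : List Int :=
  if _h : 2 * pos + 1 < heap.length then
    let c := if 2 * pos + 2 < heap.length ∧ ¬ heap.getD (2 * pos + 1) 0 < heap.getD (2 * pos + 2) 0
             then 2 * pos + 2 else 2 * pos + 1
    pvSiftup (heap.set pos (heap.getD c 0)) start c new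
  else pvSiftdown (heap.set pos new) start pos new
termination_by heap.length - pos
decreasing_by simp only [List.length_set]; split <;> omega

def pvHeappush (heap : List Int) (item : Int) : List Int :=
  pvSiftdown (heap ++ [item]) 0 heap.length item

def pvHeappop (heap : List Int) : Int × List Int :=
  let lastelt := heap.getD (heap.length - 1) 0
  let rest := heap.take (heap.length - 1)
  if rest.isEmpty then (lastelt, rest)
  else (rest.getD 0 0, pvSiftup (rest.set 0 lastelt) 0 0 lastelt)

def pvStepA (st : List Int × List Int × Int × Int) (i : Int) : List Int × List Int × Int × Int :=
  let mx := st.1; let mn := st.2.1; let result := st.2.2.1; let count := st.2.2.2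
  let k := PySem.Int.floordiv count 3 + 1
  let q : List Int × List Int :=
    if mx.isEmpty ∨ -(mx.getD 0 0) ≥ i then (pvHeappush mx (-i), mn)
    else (mx, pvHeappush mn i)
  let r : List Int × List Int :=
    if (q.1.length : Int) > k then
      let p := pvHeappop q.1
      (p.2, pvHeappush q.2 (-p.1))
    else if (q.1.length : Int) < k ∧ q.2 ≠ [] then
      let p := pvHeappop q.2
      (pvHeappush q.1 (-p.1), p.2)
    else q
  let result := if (r.1.length : Int) ≥ k then result + -(r.1.getD 0 0) else result
  (r.1, r.2, result, count + 1)

def sumall_kth (A : List Int) : Int := (A.foldl pvStepA ([], [], 0, 0)).2.2.1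


-- ===== PORT B =====
-- bisect.insort s i = s[:bisect_right(s,i)] + [i] + s[bisect_right(s,i):]
def pvInsort (s : List Int) (i : Int) : List Int :=
  let p := PySem.List.bisectRight s i
  s.take p ++ i :: s.drop p

def pvStepB (st : List Int × Int × Int) (i : Int) : List Int × Int × Int :=
  let k := PySem.Int.floordiv st.2.2 3 + 1
  let s := pvInsort st.1 i
  (s, st.2.1 + PySem.List.pyGetD s (k - 1) 0, st.2.2 + 1)

def sumall_kth_alt (A : List Int) : Int := (A.foldl pvStepB ([], 0, 0)).2.1







-- ===== PRECONDITION & SPEC =====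
-- (no Pre_: the Python A returns normally on every list of ints; s[k-1] in B is always
-- in range since k-1 = count//3 ≤ count = len(s)-1, proved in the lemmas below)
def Spec_sumall_kth (A : List Int) (out : Int) : Prop := out = sumall_kth_alt A
instance (A : List Int) (out : Int) : Decidable (Spec_sumall_kth A out) := by unfold Spec_sumall_kth; infer_instance

-- ===== CLAIM (what is proved, stated in full; the proofs are below) =====
def Claim_equal_sumall_kth : Prop := ∀ (A : List Int), Dom_sumall_kth A → Spec_sumall_kth A (sumall_kth A)

-- ===== LEMMAS AND PROOFS =====
-- getD/set toolkit
theorem pv_getD_set_eq (l : List Int) (i : Nat) (a : Int) (h : i < l.length) :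
    (l.set i a).getD i 0 = a := by
  simp [List.getD_eq_getElem?_getD, h]

theorem pv_getD_set_ne (l : List Int) (i j : Nat) (a : Int) (h : i ≠ j) :
    (l.set i a).getD j 0 = l.getD j 0 := by
  simp [List.getD_eq_getElem?_getD, List.getElem?_set_ne h]

theorem pv_getD_mem (l : List Int) (i : Nat) (h : i < l.length) : l.getD i 0 ∈ l := by
  rw [List.getD_eq_getElem l 0 h]; exact List.getElem_mem h

theorem pv_mem_getD (l : List Int) (x : Int) (h : x ∈ l) :
    ∃ i, i < l.length ∧ l.getD i 0 = x := by
  obtain ⟨i, hi, rfl⟩ := List.mem_iff_getElem.1 h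
  exact ⟨i, hi, List.getD_eq_getElem l 0 hi⟩

-- basic permutation bricks
theorem pv_cons_getD_set_perm (l : List Int) (k : Nat) (a : Int) (h : k < l.length) :
    (l.getD k 0 :: l.set k a).Perm (a :: l) := by
  induction l generalizing k with
  | nil => simp at h
  | cons x t ih =>
    cases k with
    | zero => simpa using List.Perm.swap a x t
    | succ k' =>
      have h' : k' < t.length := by simpa using h
      simpa using ((List.Perm.swap x (t.getD k' 0) (t.set k' a)).trans
        ((ih k' h').cons x)).trans (List.Perm.swap a x t)

theorem pv_cons_set_comm (l : List Int) (i : Nat) (a b : Int) (h : i < l.length) :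
    (a :: l.set i b).Perm (b :: l.set i a) := by
  induction l generalizing i with
  | nil => simp at h
  | cons x t ih =>
    cases i with
    | zero => simpa using List.Perm.swap b a t
    | succ i' =>
      have h' : i' < t.length := by simpa using h
      simpa using ((List.Perm.swap x a (t.set i' b)).trans
        ((ih i' h').cons x)).trans (List.Perm.swap b x (t.set i' a))

theorem pv_set_swap_perm (l : List Int) (i j : Nat) (a : Int)
    (hi : i < l.length) (hj : j < l.length) (hne : i ≠ j) :
    ((l.set i (l.getD j 0)).set j a).Perm (l.set i a) := by
  induction l generalizing i j with
  | nil => simp at hi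
  | cons x t ih =>
    cases i with
    | zero =>
      cases j with
      | zero => exact absurd rfl hne
      | succ j' =>
        have hj' : j' < t.length := by simpa using hj
        simpa using pv_cons_getD_set_perm t j' a hj'
    | succ i' =>
      have hi' : i' < t.length := by simpa using hi
      cases j with
      | zero =>
        simpa using pv_cons_set_comm t i' a x hi'
      | succ j' =>
        have hj' : j' < t.length := by simpa using hj
        simpa using (ih i' j' hi' hj' (by omega)).cons x

-- heap layer
def pvPar (i : Nat) : Nat := (i - 1) / 2

def IsHeap (l : List Int) : Prop :=
  ∀ i : Nat, 0 < i → i < l.length → l.getD (pvPar i) 0 ≤ l.getD i 0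

def HoleInv (l : List Int) (pos : Nat) (new : Int) : Prop :=
  (∀ i : Nat, 0 < i → i < l.length → i ≠ pos → pvPar i ≠ pos →
      l.getD (pvPar i) 0 ≤ l.getD i 0) ∧
  (∀ i : Nat, 0 < i → i < l.length → pvPar i = pos →
      new ≤ l.getD i 0 ∧ (0 < pos → l.getD (pvPar pos) 0 ≤ l.getD i 0))

theorem pvSiftdown_perm (l : List Int) (start pos : Nat) (new : Int) (h : pos < l.length) :
    (pvSiftdown l start pos new).Perm (l.set pos new) := by
  fun_induction pvSiftdown l start pos new with
  | case1 l pos hsp pp parent hlt ih =>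
    have hpp : pp < pos := lt_of_le_of_lt (Nat.div_le_self _ _) (by omega)
    have hppl : pp < l.length := lt_trans hpp h
    have := ih (by simpa using hppl)
    exact this.trans (pv_set_swap_perm l pos pp new h hppl (by omega))
  | case2 => exact List.Perm.refl _
  | case3 => exact List.Perm.refl _

theorem pvSiftdown_isHeap (l : List Int) (pos : Nat) (new : Int)
    (h : pos < l.length) (hinv : HoleInv l pos new) :
    IsHeap (pvSiftdown l 0 pos new) := by
  fun_induction pvSiftdown l 0 pos new with
  | case1 l pos hsp pp parent hlt ih =>
    have hppv : pvPar pos = pp := rfl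
    have hpp : pp < pos := lt_of_le_of_lt (Nat.div_le_self _ _) (by omega)
    have hppl : pp < l.length := lt_trans hpp h
    apply ih (by simpa using hppl)
    constructor
    · intro i hi hil hip hpip
      rw [List.length_set] at hil
      by_cases hps : i = pos
      · exact absurd (hps ▸ hppv) hpip
      · by_cases hpi : pvPar i = pos
        · rw [hpi, pv_getD_set_eq l pos parent h, pv_getD_set_ne l pos i parent (by omega)]
          have h2 := (hinv.2 i hi hil hpi).2 (by omega)
          rwa [hppv] at h2
        · rw [pv_getD_set_ne l pos i parent (by omega), pv_getD_set_ne l pos (pvPar i) parent (by omega)]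
          exact hinv.1 i hi hil hps hpi
    · intro i hi hil hpar
      rw [List.length_set] at hil
      have hclean : 0 < pp → l.getD (pvPar pp) 0 ≤ l.getD pp 0 := by
        intro h0
        exact hinv.1 pp h0 hppl (by omega) (by simp only [pvPar]; omega)
      by_cases hps : i = pos
      · subst hps
        rw [pv_getD_set_eq l i parent h,
            pv_getD_set_ne l i (pvPar pp) parent (by simp only [pvPar]; omega)]
        exact ⟨le_of_lt hlt, hclean⟩
      · have hbase : l.getD pp 0 ≤ l.getD i 0 := by
          have := hinv.1 i hi hil (by omega) (by omega)
          rwa [hpar] at this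
        rw [pv_getD_set_ne l pos i parent (by omega)]
        refine ⟨le_trans (le_of_lt hlt) hbase, ?_⟩
        intro h0
        rw [pv_getD_set_ne l pos (pvPar pp) parent (by simp only [pvPar]; omega)]
        exact le_trans (hclean h0) hbase
  | case2 l pos hsp pp parent hge =>
    intro i hi hil
    rw [List.length_set] at hil
    have hppv : pvPar pos = pp := rfl
    have hpp : pp < pos := lt_of_le_of_lt (Nat.div_le_self _ _) (by omega)
    by_cases hps : i = pos
    · subst hps
      rw [pv_getD_set_eq l i new h, hppv, pv_getD_set_ne l i pp new (by omega)]
      omega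
    · by_cases hpi : pvPar i = pos
      · rw [hpi, pv_getD_set_eq l pos new h, pv_getD_set_ne l pos i new (by omega)]
        exact (hinv.2 i hi hil hpi).1
      · rw [pv_getD_set_ne l pos i new (by omega), pv_getD_set_ne l pos (pvPar i) new (by omega)]
        exact hinv.1 i hi hil hps hpi
  | case3 l pos hsp =>
    have hp0 : pos = 0 := by omega
    subst hp0
    intro i hi hil
    rw [List.length_set] at hil
    by_cases hpi : pvPar i = 0
    · rw [hpi, pv_getD_set_eq l 0 new h, pv_getD_set_ne l 0 i new (by omega)]
      exact (hinv.2 i hi hil hpi).1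
    · rw [pv_getD_set_ne l 0 i new (by omega), pv_getD_set_ne l 0 (pvPar i) new (by omega)]
      exact hinv.1 i hi hil (by omega) hpi

theorem pv_root_min (l : List Int) (hh : IsHeap l) :
    ∀ i : Nat, i < l.length → l.getD 0 0 ≤ l.getD i 0 := by
  intro i
  induction i using Nat.strong_induction_on with
  | _ i ih =>
    intro hil
    rcases Nat.eq_zero_or_pos i with h0 | h0
    · subst h0; exact le_refl _
    · have hpar : pvPar i < i := lt_of_le_of_lt (Nat.div_le_self _ _) (by omega)
      exact le_trans (ih (pvPar i) hpar (lt_trans hpar hil)) (hh i h0 hil)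

def SUInv (l : List Int) (pos : Nat) : Prop :=
  (∀ i : Nat, 0 < i → i < l.length → i ≠ pos → pvPar i ≠ pos →
      l.getD (pvPar i) 0 ≤ l.getD i 0) ∧
  (∀ i : Nat, 0 < i → i < l.length → pvPar i = pos → 0 < pos →
      l.getD (pvPar pos) 0 ≤ l.getD i 0)

theorem pvSiftup_perm (l : List Int) (pos : Nat) (new : Int) (h : pos < l.length) :
    (pvSiftup l 0 pos new).Perm (l.set pos new) := by
  fun_induction pvSiftup l 0 pos new with
  | case1 l pos hc c ih =>
    have hd : c = if 2 * pos + 2 < l.length ∧ ¬ l.getD (2 * pos + 1) 0 < l.getD (2 * pos + 2) 0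
               then 2 * pos + 2 else 2 * pos + 1 := rfl
    have hcb : pos < c ∧ c < l.length := by
      rw [hd]; split <;> omega
    have hcl : c < (l.set pos (l.getD c 0)).length := by simpa using hcb.2
    exact (ih hcl).trans (pv_set_swap_perm l pos c new h hcb.2 (by omega))
  | case2 l pos hc =>
    have := pvSiftdown_perm (l.set pos new) 0 pos new (by simpa using h)
    simpa [List.set_set] using this

theorem pvSiftup_isHeap (l : List Int) (pos : Nat) (new : Int)
    (h : pos < l.length) (hinv : SUInv l pos) :
    IsHeap (pvSiftup l 0 pos new) := by
  fun_induction pvSiftup l 0 pos new with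
  | case1 l pos hc c ih =>
    have hd : c = if 2 * pos + 2 < l.length ∧ ¬ l.getD (2 * pos + 1) 0 < l.getD (2 * pos + 2) 0
               then 2 * pos + 2 else 2 * pos + 1 := rfl
    have hcb : pos < c ∧ c < l.length ∧ (c = 2 * pos + 1 ∨ c = 2 * pos + 2) := by
      rw [hd]; split <;> omega
    have hparc : pvPar c = pos := by
      simp only [pvPar]; omega
    have hsib : ∀ j : Nat, 0 < j → j < l.length → pvPar j = pos → j ≠ c →
        l.getD c 0 ≤ l.getD j 0 := by
      intro j hj0 hjl hpj hjc
      have hj' : j = 2 * pos + 1 ∨ j = 2 * pos + 2 := by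
        simp only [pvPar] at hpj; omega
      rw [hd]
      rw [hd] at hjc
      split
      · next hcc =>
        have hj1 : j = 2 * pos + 1 := by split at hjc <;> omega
        subst hj1; exact le_of_not_gt hcc.2
      · next hcc =>
        have hj2 : j = 2 * pos + 2 := by split at hjc <;> omega
        subst hj2
        have h2l : 2 * pos + 2 < l.length := hjl
        have := not_and.mp hcc h2l
        exact le_of_lt (not_not.mp this)
    apply ih (by simpa using hcb.2.1)
    constructor
    · intro i hi hil hic hpic
      rw [List.length_set] at hil
      by_cases hip : i = pos
      · subst hip
        rw [pv_getD_set_eq l i (l.getD c 0) h]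
        rw [pv_getD_set_ne l i (pvPar i) (l.getD c 0) (by simp only [pvPar]; omega)]
        exact hinv.2 c (by omega) hcb.2.1 hparc hi
      · by_cases hpip : pvPar i = pos
        · rw [hpip, pv_getD_set_eq l pos (l.getD c 0) h,
              pv_getD_set_ne l pos i (l.getD c 0) (by omega)]
          exact hsib i hi hil hpip hic
        · rw [pv_getD_set_ne l pos i (l.getD c 0) (by omega),
              pv_getD_set_ne l pos (pvPar i) (l.getD c 0) (by omega)]
          exact hinv.1 i hi hil hip hpip
    · intro i hi hil hpi _
      rw [List.length_set] at hil
      have hig : c < i := by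
        simp only [pvPar] at hpi; omega
      rw [hparc, pv_getD_set_eq l pos (l.getD c 0) h,
          pv_getD_set_ne l pos i (l.getD c 0) (by omega)]
      have := hinv.1 i hi hil (by omega) (by omega)
      rwa [hpi] at this
  | case2 l pos hc =>
    apply pvSiftdown_isHeap (l.set pos new) pos new (by simpa using h)
    constructor
    · intro i hi hil hip hpip
      rw [List.length_set] at hil
      rw [pv_getD_set_ne l pos i new (by omega),
          pv_getD_set_ne l pos (pvPar i) new (by omega)]
      exact hinv.1 i hi hil hip hpip
    · intro i hi hil hpi
      have : i = 2 * pos + 1 ∨ i = 2 * pos + 2 := by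
        simp only [pvPar] at hpi; omega
      rw [List.length_set] at hil
      omega

theorem pvHeappush_perm (h : List Int) (x : Int) : (pvHeappush h x).Perm (x :: h) := by
  unfold pvHeappush
  have hl : h.length < (h ++ [x]).length := by simp
  have hset : (h ++ [x]).set h.length x = h ++ [x] := by
    apply List.ext_getElem (by simp)
    intro i h1 h2
    by_cases hi : i = h.length
    · subst hi; simp
    · rw [List.getElem_set_ne (by omega)]
  exact ((pvSiftdown_perm _ 0 h.length x hl).trans (by rw [hset])).trans
    (List.perm_append_singleton x h)

theorem pvHeappush_length (h : List Int) (x : Int) :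
    (pvHeappush h x).length = h.length + 1 := by
  simpa using (pvHeappush_perm h x).length_eq

theorem pvHeappush_isHeap (h : List Int) (x : Int) (hh : IsHeap h) :
    IsHeap (pvHeappush h x) := by
  unfold pvHeappush
  apply pvSiftdown_isHeap (h ++ [x]) h.length x (by simp)
  constructor
  · intro i hi hil hip hpip
    rw [List.length_append, List.length_singleton] at hil
    have hil' : i < h.length := by omega
    have hpil : pvPar i < h.length := lt_of_le_of_lt (by simp only [pvPar]; omega) hil'
    rw [List.getD_append _ _ _ _ hil', List.getD_append _ _ _ _ hpil]
    exact hh i hi hil'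
  · intro i hi hil hpi
    simp only [pvPar] at hpi
    rw [List.length_append, List.length_singleton] at hil
    omega

theorem pv_getD_take (l : List Int) (i j : Nat) (h : i < j) :
    (l.take j).getD i 0 = l.getD i 0 := by
  simp [List.getD_eq_getElem?_getD, h]

theorem pvHeappop_fst (h : List Int) (hne : h ≠ []) : (pvHeappop h).1 = h.getD 0 0 := by
  by_cases hemp : (h.take (h.length - 1)).isEmpty
  · have h1 : h.length - 1 = 0 := by
      rw [List.isEmpty_iff, List.take_eq_nil_iff] at hemp
      rcases hemp with h' | h'
      · omega
      · exact absurd h' hne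
    simp [pvHeappop, h1]
  · have hlen : 1 ≤ h.length - 1 := by
      rcases Nat.lt_or_ge (h.length - 1) 1 with h1 | h1
      · exact absurd (by rw [List.isEmpty_iff, List.take_eq_nil_iff]; omega) hemp
      · exact h1
    simp only [pvHeappop, hemp, if_false, Bool.false_eq_true]
    exact pv_getD_take h 0 _ hlen

theorem pvHeappop_perm (h : List Int) (hne : h ≠ []) :
    h.Perm ((pvHeappop h).1 :: (pvHeappop h).2) := by
  by_cases hemp : (h.take (h.length - 1)).isEmpty
  · have h1 : h.length - 1 = 0 := by
      rw [List.isEmpty_iff, List.take_eq_nil_iff] at hemp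
      rcases hemp with h' | h'
      · omega
      · exact absurd h' hne
    have hl1 : h.length = 1 := by
      rcases h with _ | ⟨a, t⟩
      · exact absurd rfl hne
      · simp only [List.length_cons] at h1 ⊢; omega
    rcases h with _ | ⟨a, t⟩
    · exact absurd rfl hne
    · have ht : t = [] := by simpa using hl1
      subst ht
      simp [pvHeappop]
  · have hlen : 1 ≤ h.length - 1 := by
      rcases Nat.lt_or_ge (h.length - 1) 1 with h1 | h1
      · exact absurd (by rw [List.isEmpty_iff, List.take_eq_nil_iff]; omega) hemp
      · exact h1
    have hrl : (h.take (h.length - 1)).length = h.length - 1 := by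
      simp [List.length_take]
    simp only [pvHeappop, hemp, if_false, Bool.false_eq_true]
    have hsp := pvSiftup_perm ((h.take (h.length - 1)).set 0 (h.getD (h.length - 1) 0)) 0
      (h.getD (h.length - 1) 0) (by rw [List.length_set]; omega)
    rw [List.set_set] at hsp
    -- h ~ take ++ [last] ~ last :: take ~ take[0] :: take.set 0 last ~ fst :: snd
    have hdec : h = h.take (h.length - 1) ++ [h.getD (h.length - 1) 0] := by
      rw [List.getD_eq_getElem h 0 (by omega)]
      conv_lhs => rw [← List.take_append_drop (h.length - 1) h]
      congr 1
      rw [List.drop_eq_getElem_cons (by omega)]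
      simp only [List.cons.injEq, true_and]
      rw [List.drop_eq_nil_iff]
      omega
    conv_lhs => rw [hdec]
    refine (List.perm_append_singleton _ _).trans ?_
    refine ((pv_cons_getD_set_perm (h.take (h.length - 1)) 0 (h.getD (h.length - 1) 0)
      (by omega)).symm).trans ?_
    exact List.Perm.cons _ hsp.symm

theorem pvHeappop_isHeap (h : List Int) (_hne : h ≠ []) (hh : IsHeap h) :
    IsHeap (pvHeappop h).2 := by
  by_cases hemp : (h.take (h.length - 1)).isEmpty
  · simp only [pvHeappop, hemp, if_true]
    rw [List.isEmpty_iff] at hemp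
    rw [hemp]
    intro i hi hil
    simp at hil
  · have hlen : 1 ≤ h.length - 1 := by
      rcases Nat.lt_or_ge (h.length - 1) 1 with h1 | h1
      · exact absurd (by rw [List.isEmpty_iff, List.take_eq_nil_iff]; omega) hemp
      · exact h1
    have hrl : (h.take (h.length - 1)).length = h.length - 1 := by
      simp [List.length_take]
    simp only [pvHeappop, hemp, if_false, Bool.false_eq_true]
    apply pvSiftup_isHeap _ 0 _ (by rw [List.length_set]; omega)
    constructor
    · intro i hi hil hip hpip
      rw [List.length_set, hrl] at hil
      rw [pv_getD_set_ne _ 0 i _ (by omega), pv_getD_set_ne _ 0 (pvPar i) _ (by omega),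
          pv_getD_take h i _ (by omega), pv_getD_take h (pvPar i) _
            (lt_of_le_of_lt (by simp only [pvPar]; omega) (by omega : i < h.length - 1))]
      exact hh i hi (by omega)
    · intro i hi hil hpi hpos
      omega

theorem pvHeappop_length (h : List Int) (hne : h ≠ []) :
    (pvHeappop h).2.length + 1 = h.length := by
  have := (pvHeappop_perm h hne).length_eq
  simp at this
  omega

-- sorted-list index layer
theorem pv_sorted_getD_le (s : List Int) (M : Int) (k : Nat)
    (hs : s.Pairwise (· ≤ ·)) (hk : 1 ≤ k)
    (hc : k ≤ s.countP (fun x => decide (x ≤ M))) :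
    s.getD (k - 1) 0 ≤ M := by
  induction s generalizing k with
  | nil => simp at hc; omega
  | cons x t ih =>
    rw [List.pairwise_cons] at hs
    rcases Nat.lt_or_ge k 2 with h2 | h2
    · have hk1 : k = 1 := by omega
      subst hk1
      have hpos : 0 < (x :: t).countP (fun x => decide (x ≤ M)) := by omega
      obtain ⟨y, hy, hyM⟩ := List.countP_pos_iff.mp hpos
      simp only [decide_eq_true_eq] at hyM
      rcases List.mem_cons.mp hy with rfl | hyt
      · simpa using hyM
      · simpa using le_trans (hs.1 y hyt) hyM
    · have hct : k - 1 ≤ t.countP (fun x => decide (x ≤ M)) := by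
        rw [List.countP_cons] at hc
        split_ifs at hc <;> omega
      have := ih hs.2 (k := k - 1) (by omega) hct
      have hg : (x :: t).getD (k - 1) 0 = t.getD (k - 1 - 1) 0 := by
        rcases Nat.exists_eq_add_of_le h2 with ⟨m, rfl⟩
        simp [Nat.add_comm 2 m]
      rwa [hg]

theorem pv_sorted_getD_ge (s : List Int) (M : Int) (k : Nat)
    (hs : s.Pairwise (· ≤ ·)) (hk : 1 ≤ k) (hkl : k ≤ s.length)
    (hc : s.countP (fun x => decide (x < M)) < k) :
    M ≤ s.getD (k - 1) 0 := by
  induction s generalizing k with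
  | nil => simp at hkl; omega
  | cons x t ih =>
    rw [List.pairwise_cons] at hs
    rcases Nat.lt_or_ge k 2 with h2 | h2
    · have hk1 : k = 1 := by omega
      subst hk1
      have h0 : (x :: t).countP (fun x => decide (x < M)) = 0 := by omega
      have := List.countP_eq_zero.mp h0 x (List.mem_cons_self)
      simp only [decide_eq_true_eq] at this
      simpa using le_of_not_gt this
    · have hg : (x :: t).getD (k - 1) 0 = t.getD (k - 1 - 1) 0 := by
        rcases Nat.exists_eq_add_of_le h2 with ⟨m, rfl⟩
        simp [Nat.add_comm 2 m]
      rw [hg]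
      by_cases hx : x < M
      · apply ih hs.2 (k := k - 1) (by omega) (by simp at hkl; omega)
        rw [List.countP_cons] at hc
        simp [hx] at hc
        omega
      · have hmem : t.getD (k - 1 - 1) 0 ∈ t :=
          pv_getD_mem t _ (by simp at hkl; omega)
        exact le_trans (le_of_not_gt hx) (hs.1 _ hmem)

theorem pv_sorted_partition_getD (s u v : List Int) (k : Nat) (M : Int)
    (hs : s.Pairwise (· ≤ ·)) (hp : (u ++ v).Perm s) (hk : u.length = k) (hk1 : 1 ≤ k)
    (hM : M ∈ u) (hmax : ∀ a ∈ u, a ≤ M) (hup : ∀ b ∈ v, M ≤ b) :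
    s.getD (k - 1) 0 = M := by
  have hcle : k ≤ s.countP (fun x => decide (x ≤ M)) := by
    rw [← hp.countP_eq]
    rw [List.countP_append]
    have : u.countP (fun x => decide (x ≤ M)) = u.length :=
      List.countP_eq_length.mpr (fun a ha => by simpa using hmax a ha)
    omega
  have hclt : s.countP (fun x => decide (x < M)) < k := by
    rw [← hp.countP_eq, List.countP_append]
    have hv : v.countP (fun x => decide (x < M)) = 0 :=
      List.countP_eq_zero.mpr (fun b hb => by simpa using not_lt_of_ge (hup b hb))
    have hu : u.countP (fun x => decide (x < M)) < u.length := by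
      rcases Nat.lt_or_ge (u.countP (fun x => decide (x < M))) u.length with h' | h'
      · exact h'
      · exfalso
        have := List.countP_eq_length.mp (le_antisymm (List.countP_le_length) h')
        have := this M hM
        simp at this
    omega
  have hkl : k ≤ s.length := by
    calc k ≤ s.countP (fun x => decide (x ≤ M)) := hcle
      _ ≤ s.length := List.countP_le_length
  exact le_antisymm (pv_sorted_getD_le s M k hs hk1 hcle)
    (pv_sorted_getD_ge s M k hs hk1 hkl hclt)

-- insort layer
theorem pvInsort_perm (s : List Int) (i : Int) : (pvInsort s i).Perm (i :: s) := by
  unfold pvInsort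
  exact (List.perm_middle).trans (by rw [List.take_append_drop])

theorem pvInsort_sorted (s : List Int) (i : Int) (hs : s.Pairwise (· ≤ ·)) :
    (pvInsort s i).Pairwise (· ≤ ·) := by
  obtain ⟨hple, hlo, hhi⟩ := PySem.List.bisectRight_spec s i hs
  unfold pvInsort
  set p := PySem.List.bisectRight s i with hp
  have hmemtake : ∀ a ∈ s.take p, a ≤ i := by
    intro a ha
    obtain ⟨j, hj, rfl⟩ := List.mem_iff_getElem.mp ha
    rw [List.getElem_take]
    exact hlo j (by simp at hj; omega) (by simp at hj; omega)
  have hmemdrop : ∀ b ∈ s.drop p, i ≤ b := by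
    intro b hb
    obtain ⟨j, hj, rfl⟩ := List.mem_iff_getElem.mp hb
    rw [List.getElem_drop]
    exact le_of_lt (hhi (p + j) (by simp at hj; omega) (by omega))
  rw [List.pairwise_append]
  refine ⟨hs.sublist (List.take_sublist _ _), ?_, ?_⟩
  · rw [List.pairwise_cons]
    exact ⟨hmemdrop, hs.sublist (List.drop_sublist _ _)⟩
  · intro a ha b hb
    rcases List.mem_cons.mp hb with rfl | hbd
    · exact hmemtake a ha
    · exact le_trans (hmemtake a ha) (hmemdrop b hbd)

-- algorithm layer
theorem pv_root_le (l : List Int) (hh : IsHeap l) (y : Int) (hy : y ∈ l) :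
    l.getD 0 0 ≤ y := by
  obtain ⟨j, hj, rfl⟩ := pv_mem_getD l y hy
  exact pv_root_min l hh j hj

def PvPart (mx mn : List Int) : Prop := ∀ a ∈ mx, ∀ b ∈ mn, -a ≤ b

def PvRel (sa : List Int × List Int × Int × Int) (sb : List Int × Int × Int) : Prop :=
  IsHeap sa.1 ∧ IsHeap sa.2.1 ∧
  sa.2.2.1 = sb.2.1 ∧
  sa.2.2.2 = (sb.1.length : Int) ∧ sb.2.2 = (sb.1.length : Int) ∧
  sb.1.Pairwise (· ≤ ·) ∧
  ((sa.1.map (fun a => -a)) ++ sa.2.1).Perm sb.1 ∧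
  PvPart sa.1 sa.2.1 ∧
  sa.1.length = (if sb.1.length = 0 then 0 else (sb.1.length - 1) / 3 + 1)

theorem pv_value_eq (mx2 mn2 s' : List Int) (K : Nat)
    (hh2x : IsHeap mx2) (hperm2 : ((mx2.map (fun a => -a)) ++ mn2).Perm s')
    (hpart2 : PvPart mx2 mn2) (hlen2 : mx2.length = K) (hK : 1 ≤ K)
    (hsort' : s'.Pairwise (· ≤ ·)) :
    s'.getD (K - 1) 0 = -(mx2.getD 0 0) := by
  have hne : mx2 ≠ [] := by
    intro h0; rw [h0] at hlen2; simp at hlen2; omega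
  have hrootmem : mx2.getD 0 0 ∈ mx2 :=
    pv_getD_mem mx2 0 (by cases mx2 with | nil => exact absurd rfl hne | cons a t => simp)
  apply pv_sorted_partition_getD s' (mx2.map (fun a => -a)) mn2 K (-(mx2.getD 0 0))
      hsort' hperm2 (by simpa using hlen2) hK
  · exact List.mem_map.mpr ⟨mx2.getD 0 0, hrootmem, rfl⟩
  · intro a ha
    obtain ⟨b, hb, rfl⟩ := List.mem_map.mp ha
    exact neg_le_neg (pv_root_le mx2 hh2x b hb)
  · intro b hb
    exact hpart2 (mx2.getD 0 0) hrootmem b hb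


theorem pv_finish (mx2 mn2 s s' : List Int) (res resB cnt cntB i : Int)
    (hres : res = resB) (hcnt : cnt = (s.length : Int)) (hcntB : cntB = (s.length : Int))
    (hs'perm : s'.Perm (i :: s)) (hs'sort : s'.Pairwise (· ≤ ·))
    (hh2x : IsHeap mx2) (hh2n : IsHeap mn2)
    (hperm2i : ((mx2.map (fun a => -a)) ++ mn2).Perm (i :: s))
    (hpart2 : PvPart mx2 mn2)
    (hlen2 : mx2.length = s.length / 3 + 1) :
    PvRel (mx2, mn2,
        (if ((mx2.length : Int) ≥ ((s.length / 3 + 1 : Nat) : Int)) then res + -(mx2.getD 0 0)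
         else res),
        cnt + 1)
      (s', resB + s'.getD (s.length / 3) 0, cntB + 1) := by
  have hs'len : s'.length = s.length + 1 := by simpa using hs'perm.length_eq
  have hperm2 : ((mx2.map (fun a => -a)) ++ mn2).Perm s' := hperm2i.trans hs'perm.symm
  have hval : s'.getD (s.length / 3) 0 = -(mx2.getD 0 0) := by
    have := pv_value_eq mx2 mn2 s' (s.length / 3 + 1) hh2x hperm2 hpart2 hlen2 (by omega) hs'sort
    simpa using this
  have hguard : ((mx2.length : Int) ≥ ((s.length / 3 + 1 : Nat) : Int)) := by
    rw [hlen2]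
  rw [if_pos hguard]
  refine ⟨hh2x, hh2n, ?_, ?_, ?_, hs'sort, hperm2, hpart2, ?_⟩
  · simp only [hres, hval]
  · simp only [hcnt, hs'len]; push_cast; ring
  · simp only [hcntB, hs'len]; push_cast; ring
  · simp only [hs'len]
    rw [if_neg (by omega)]
    simp [hlen2]

theorem pvStep_rel (mx mn : List Int) (res cnt : Int) (s : List Int) (resB cntB : Int)
    (i : Int) (hr : PvRel (mx, mn, res, cnt) (s, resB, cntB)) :
    PvRel (pvStepA (mx, mn, res, cnt) i) (pvStepB (s, resB, cntB) i) := by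
  obtain ⟨hhx, hhn, hres, hcnt, hcntB, hsort, hperm, hpart, hlenx⟩ := hr
  simp only at hhx hhn hres hcnt hcntB hsort hperm hpart hlenx
  have hkA : PySem.Int.floordiv cnt 3 + 1 = ((s.length / 3 + 1 : Nat) : Int) := by
    rw [hcnt, show (3:Int) = ((3:Nat):Int) by norm_num, PySem.Int.floordiv_natCast]
    push_cast; ring
  have hkB : PySem.Int.floordiv cntB 3 + 1 - 1 = ((s.length / 3 : Nat) : Int) := by
    rw [hcntB, show (3:Int) = ((3:Nat):Int) by norm_num, PySem.Int.floordiv_natCast]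
    push_cast; ring
  have hs'perm : (pvInsort s i).Perm (i :: s) := pvInsort_perm s i
  have hs'sort : (pvInsort s i).Pairwise (· ≤ ·) := pvInsort_sorted s i hsort
  have hs'len : (pvInsort s i).length = s.length + 1 := by simpa using hs'perm.length_eq
  -- goal reduction
  simp only [pvStepA, pvStepB, hkA, hkB, PySem.List.pyGetD_natCast]
  have hbb : (s.length = 0 ∧ mx.length = 0) ∨
      (1 ≤ s.length ∧ mx.length = (s.length - 1) / 3 + 1) := by
    rcases Nat.eq_zero_or_pos s.length with h0 | h0
    · left; rw [if_pos h0] at hlenx; exact ⟨h0, hlenx⟩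
    · right; rw [if_neg (by omega)] at hlenx; exact ⟨h0, hlenx⟩
  by_cases hc1 : (mx.isEmpty = true ∨ -mx.getD 0 0 ≥ i)
  · simp only [if_pos hc1]
    have hm1 : (pvHeappush mx (-i)).length = mx.length + 1 := pvHeappush_length mx (-i)
    have hh1 : IsHeap (pvHeappush mx (-i)) := pvHeappush_isHeap mx (-i) hhx
    have hperm1 : (((pvHeappush mx (-i)).map (fun a => -a)) ++ mn).Perm (i :: s) := by
      have hmap : ((pvHeappush mx (-i)).map (fun a => -a)).Perm (i :: mx.map (fun a => -a)) := by
        simpa using (pvHeappush_perm mx (-i)).map (fun a => -a)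
      have h2 := List.Perm.append_right mn hmap
      rw [List.cons_append] at h2
      exact h2.trans (hperm.cons i)
    have hpart1 : PvPart (pvHeappush mx (-i)) mn := by
      intro a ha b hb
      have hmem := (pvHeappush_perm mx (-i)).mem_iff.mp ha
      rcases List.mem_cons.mp hmem with rfl | hamx
      · -- a = -i; need i ≤ b
        simp only [neg_neg]
        by_cases hmx0 : mx = []
        · -- mx empty → mn empty → no b
          exfalso
          have hmn0 : mn.length = 0 := by
            have hle := hperm.length_eq
            rw [hmx0] at hle
            simp at hle
            rcases hbb with ⟨h0, _⟩ | ⟨_, hl⟩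
            · omega
            · rw [hmx0] at hl; simp only [List.length_nil] at hl; omega
          rw [List.length_eq_zero_iff] at hmn0
          rw [hmn0] at hb
          simp at hb
        · have hge : -mx.getD 0 0 ≥ i := by
            rcases hc1 with hemp | hge
            · exact absurd (List.isEmpty_iff.mp hemp) hmx0
            · exact hge
          have hrm : mx.getD 0 0 ∈ mx := pv_getD_mem mx 0 (by
            cases mx with | nil => exact absurd rfl hmx0 | cons a t => simp)
          exact le_trans hge (hpart _ hrm b hb)
      · exact hpart a hamx b hb
    by_cases hc2 : ((pvHeappush mx (-i)).length : Int) > ((s.length / 3 + 1 : Nat) : Int)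
    · simp only [if_pos hc2]
      have hKm : mx.length = s.length / 3 + 1 := by
        have h' : (pvHeappush mx (-i)).length > s.length / 3 + 1 := by exact_mod_cast hc2
        rcases hbb with ⟨h0, hl⟩ | ⟨h0, hl⟩ <;> omega
      have hne1 : pvHeappush mx (-i) ≠ [] := by
        intro h0
        have := hm1
        rw [h0] at this
        simp at this
      have hpp := pvHeappop_perm (pvHeappush mx (-i)) hne1
      have hpf := pvHeappop_fst (pvHeappush mx (-i)) hne1
      have hph := pvHeappop_isHeap (pvHeappush mx (-i)) hne1 hh1
      have hpl := pvHeappop_length (pvHeappush mx (-i)) hne1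
      apply pv_finish _ _ _ _ _ _ _ _ _ hres hcnt hcntB hs'perm hs'sort hph
        (pvHeappush_isHeap mn _ hhn) ?_ ?_ ?_
      · -- perm
        refine (List.Perm.append_left _ (pvHeappush_perm mn _)).trans ?_
        refine (List.perm_middle).trans ?_
        rw [← List.cons_append]
        refine (List.Perm.append_right mn ?_).trans hperm1
        have := (hpp.map (fun a => -a)).symm
        simpa using this
      · -- partition
        intro a ha b hb
        have hamem : a ∈ pvHeappush mx (-i) := hpp.mem_iff.mpr (List.mem_cons_of_mem _ ha)
        have hbmem := (pvHeappush_perm mn (-(pvHeappop (pvHeappush mx (-i))).1)).mem_iff.mp hb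
        rcases List.mem_cons.mp hbmem with rfl | hbmn
        · have hra : (pvHeappush mx (-i)).getD 0 0 ≤ a := pv_root_le _ hh1 a hamem
          rw [← hpf] at hra
          omega
        · exact hpart1 a hamem b hbmn
      · -- length
        have h' : (pvHeappush mx (-i)).length > s.length / 3 + 1 := by exact_mod_cast hc2
        omega
    · have hc3 : ¬(((pvHeappush mx (-i)).length : Int) < ((s.length / 3 + 1 : Nat) : Int) ∧ mn ≠ []) := by
        rintro ⟨h', -⟩
        have h'' : (pvHeappush mx (-i)).length < s.length / 3 + 1 := by exact_mod_cast h'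
        rcases hbb with ⟨h0, hl⟩ | ⟨h0, hl⟩ <;> omega
      simp only [if_neg hc2, if_neg hc3]
      apply pv_finish _ _ _ _ _ _ _ _ _ hres hcnt hcntB hs'perm hs'sort hh1 hhn hperm1 hpart1 ?_
      have h' : ¬(pvHeappush mx (-i)).length > s.length / 3 + 1 := by
        intro h''
        exact hc2 (by exact_mod_cast h'')
      rcases hbb with ⟨h0, hl⟩ | ⟨h0, hl⟩ <;> omega
  · -- first condition false: push i onto mn
    simp only [if_neg hc1]
    have hmxne : mx ≠ [] := by
      intro h0
      exact hc1 (Or.inl (by rw [h0]; rfl))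
    have hrm : mx.getD 0 0 ∈ mx := pv_getD_mem mx 0 (by
      cases mx with | nil => exact absurd rfl hmxne | cons a t => simp)
    have hlt : -mx.getD 0 0 < i := by
      rcases not_or.mp hc1 with ⟨-, h2⟩
      omega
    have hn1 : 1 ≤ s.length := by
      rcases hbb with ⟨h0, hl⟩ | ⟨h0, hl⟩
      · exfalso
        apply hmxne
        rw [← List.length_eq_zero_iff]
        exact hl
      · exact h0
    have hm0 : mx.length = (s.length - 1) / 3 + 1 := by
      rcases hbb with ⟨h0, hl⟩ | ⟨h0, hl⟩
      · omega
      · exact hl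
    have hmn1len : (pvHeappush mn i).length = mn.length + 1 := pvHeappush_length mn i
    have hmn1ne : pvHeappush mn i ≠ [] := by
      intro h0
      rw [h0] at hmn1len
      simp at hmn1len
    have hh1n : IsHeap (pvHeappush mn i) := pvHeappush_isHeap mn i hhn
    have hperm1 : ((mx.map (fun a => -a)) ++ pvHeappush mn i).Perm (i :: s) := by
      refine (List.Perm.append_left _ (pvHeappush_perm mn i)).trans ?_
      exact (List.perm_middle).trans (hperm.cons i)
    have hpart1 : PvPart mx (pvHeappush mn i) := by
      intro a ha b hb
      rcases List.mem_cons.mp ((pvHeappush_perm mn i).mem_iff.mp hb) with rfl | hbmn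
      · have : mx.getD 0 0 ≤ a := pv_root_le mx hhx a ha
        omega
      · exact hpart a ha b hbmn
    have hc2 : ¬((mx.length : Int) > ((s.length / 3 + 1 : Nat) : Int)) := by
      intro h'
      have h'' : mx.length > s.length / 3 + 1 := by exact_mod_cast h'
      omega
    simp only [if_neg hc2]
    by_cases hc3 : ((mx.length : Int) < ((s.length / 3 + 1 : Nat) : Int) ∧ pvHeappush mn i ≠ [])
    · simp only [if_pos hc3]
      have hKm : mx.length = s.length / 3 := by
        have h' : mx.length < s.length / 3 + 1 := by exact_mod_cast hc3.1
        omega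
      have hpp := pvHeappop_perm (pvHeappush mn i) hmn1ne
      have hpf := pvHeappop_fst (pvHeappush mn i) hmn1ne
      have hph := pvHeappop_isHeap (pvHeappush mn i) hmn1ne hh1n
      have hpl := pvHeappop_length (pvHeappush mn i) hmn1ne
      apply pv_finish _ _ _ _ _ _ _ _ _ hres hcnt hcntB hs'perm hs'sort
        (pvHeappush_isHeap mx _ hhx) hph ?_ ?_ ?_
      · -- perm
        have hmap : ((pvHeappush mx (-(pvHeappop (pvHeappush mn i)).1)).map (fun a => -a)).Perm
            ((pvHeappop (pvHeappush mn i)).1 :: mx.map (fun a => -a)) := by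
          simpa using (pvHeappush_perm mx (-(pvHeappop (pvHeappush mn i)).1)).map (fun a => -a)
        have h2 := List.Perm.append_right (pvHeappop (pvHeappush mn i)).2 hmap
        rw [List.cons_append] at h2
        refine h2.trans ?_
        refine (List.perm_middle.symm).trans ?_
        exact (List.Perm.append_left _ hpp.symm).trans hperm1
      · -- partition
        intro a ha b hb
        have hbmem : b ∈ pvHeappush mn i := hpp.mem_iff.mpr (List.mem_cons_of_mem _ hb)
        rcases List.mem_cons.mp ((pvHeappush_perm mx _).mem_iff.mp ha) with rfl | hamx
        · have hrb : (pvHeappush mn i).getD 0 0 ≤ b := pv_root_le _ hh1n b hbmem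
          rw [← hpf] at hrb
          omega
        · exact hpart1 a hamx b hbmem
      · -- length
        rw [pvHeappush_length]
        omega
    · simp only [if_neg hc3]
      apply pv_finish _ _ _ _ _ _ _ _ _ hres hcnt hcntB hs'perm hs'sort hhx hh1n hperm1 hpart1 ?_
      have h' : ¬(mx.length < s.length / 3 + 1) := by
        intro h''
        exact hc3 ⟨by exact_mod_cast h'', hmn1ne⟩
      omega

theorem pv_fold_rel (A : List Int) (sa : List Int × List Int × Int × Int)
    (sb : List Int × Int × Int) (hr : PvRel sa sb) :
    PvRel (A.foldl pvStepA sa) (A.foldl pvStepB sb) := by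
  induction A generalizing sa sb with
  | nil => exact hr
  | cons x t ih =>
    simp only [List.foldl_cons]
    obtain ⟨mx, mn, res, cnt⟩ := sa
    obtain ⟨s, resB, cntB⟩ := sb
    exact ih _ _ (pvStep_rel mx mn res cnt s resB cntB x hr)

theorem pv_init_rel : PvRel ([], [], 0, 0) ([], 0, 0) := by
  refine ⟨?_, ?_, rfl, by simp, by simp, List.Pairwise.nil, by simp, ?_, by simp⟩
  · intro i hi hil; simp at hil
  · intro i hi hil; simp at hil
  · intro a ha; simp at ha

-- ===== VERDICT (by name: the statement is the Claim_ definition above) =====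
theorem sumall_kth_spec : Claim_equal_sumall_kth := by
  intro A _
  unfold Spec_sumall_kth sumall_kth sumall_kth_alt
  exact (pv_fold_rel A _ _ pv_init_rel).2.2.1
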